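-- pv_equiv track=rewrite | github.com/key2/amaranth-fp | src/amaranth_fp/operators/int_const_mult.py | _to_csd
-- ===== SOURCE A (Python) =====
-- def _to_csd(value: int) -> list[tuple[int, int]]:
--     """Convert integer to CSD representation: list of (bit_position, sign).
--
--     sign is +1 or -1.
--     """
--     if value == 0:
--         return []
--
--     terms = []
--     n = abs(value)
--     sign_mult = 1 if value > 0 else -1
--     pos = 0
--     while n > 0:
--         if n & 1:
--             if n & 2:
--                 # Next bit also set → use -1 here and carry
--                 terms.append((pos, -1 * sign_mult))
--                 n += 1
--             else:
--                 terms.append((pos, 1 * sign_mult))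
--             n >>= 1
--         else:
--             n >>= 1
--         pos += 1
--     return terms
-- ===== SOURCE B (Python) =====
-- def _to_csd(value: int) -> list[tuple[int, int]]:
--     """Convert integer to CSD representation via the NAF bit identity z = (3n) ^ n."""
--     if value == 0:
--         return []
--     n = abs(value)
--     s = 1 if value > 0 else -1
--     z = (3 * n) ^ n
--     out = []
--     q = 1
--     while z >> q:
--         if (z >> q) & 1:
--             out.append((q - 1, -s if (n >> q) & 1 else s))
--         q += 1
--     return out
-- ===== Notes on version B (the rewrite author's own statement) =====
-- stated objective: alternative
-- what changed: Replaces A's carry-propagating while loop (which mutates n via n+=1 on 11-bit patterns) by the closed-form NAF bit identity: the nonzero CSD digit positions are exactly the set bits of z=(3n)^n shifted down by one, with the sign read off from the corresponding bit of the original n.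
import Mathlib
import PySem

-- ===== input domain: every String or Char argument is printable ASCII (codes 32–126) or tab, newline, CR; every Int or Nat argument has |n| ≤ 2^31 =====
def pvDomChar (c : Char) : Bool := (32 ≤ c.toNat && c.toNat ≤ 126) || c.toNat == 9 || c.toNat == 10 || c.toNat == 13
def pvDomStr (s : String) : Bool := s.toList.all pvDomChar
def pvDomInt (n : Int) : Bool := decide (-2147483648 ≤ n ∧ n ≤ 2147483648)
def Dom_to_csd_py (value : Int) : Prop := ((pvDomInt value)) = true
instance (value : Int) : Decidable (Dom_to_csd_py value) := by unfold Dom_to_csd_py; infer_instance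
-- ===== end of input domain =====

-- B replaces A's carry-propagating loop by the closed-form NAF bit identity z = (3n) XOR n
-- (objective: alternative algorithm; the equivalence below is exact on all Int inputs).

-- ===== PORT A =====
-- A's while loop: n & 1 → n % 2 = 1, n & 2 → n / 2 % 2 = 1, "n += 1; n >>= 1" → (n+1)/2.
def pvGoA (s : Int) (n : Nat) (pos : Int) : List (Int × Int) :=
  if _h0 : n = 0 then [] else
  if _h1 : n % 2 = 1 then
    if _h2 : n / 2 % 2 = 1 then
      (pos, -1 * s) :: pvGoA s ((n + 1) / 2) (pos + 1)
    else
      (pos, 1 * s) :: pvGoA s (n / 2) (pos + 1)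
  else pvGoA s (n / 2) (pos + 1)
termination_by n
decreasing_by all_goals omega

def to_csd_py (value : Int) : List (Int × Int) :=
  if value = 0 then []
  else pvGoA (if value > 0 then 1 else -1) value.natAbs 0

-- ===== PORT B =====
-- B's while loop over q with test "z >> q"; m tracks z >>> q (so m/2 = z >>> (q+1)).
def pvGoB (s : Int) (n : Nat) (m : Nat) (q : Nat) : List (Int × Int) :=
  if _h0 : m = 0 then [] else
  (if m % 2 = 1 then [((q : Int) - 1, if (n >>> q) % 2 = 1 then -s else s)] else [])
    ++ pvGoB s n (m / 2) (q + 1)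
termination_by m
decreasing_by omega

def to_csd_py_alt (value : Int) : List (Int × Int) :=
  if value = 0 then []
  else
    let n := value.natAbs
    let s : Int := if value > 0 then 1 else -1
    let z := (3 * n) ^^^ n
    pvGoB s n (z >>> 1) 1

-- ===== PRECONDITION & SPEC =====
def Spec_to_csd_py (value : Int) (out : List (Int × Int)) : Prop := out = to_csd_py_alt value
instance (value : Int) (out : List (Int × Int)) : Decidable (Spec_to_csd_py value out) := by unfold Spec_to_csd_py; infer_instance

-- ===== CLAIM (what is proved, stated in full; the proofs are below) =====
def Claim_equal_to_csd_py : Prop := ∀ (value : Int), Dom_to_csd_py value → Spec_to_csd_py value (to_csd_py value)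

-- ===== LEMMAS AND PROOFS =====

def pvZ (n : Nat) : Nat := (3 * n) ^^^ n

def pvOff (c : Int) (t : Int × Int) : Int × Int := (t.1 + c, t.2)

theorem pvOff_off (c d : Int) (l : List (Int × Int)) :
    (l.map (pvOff d)).map (pvOff c) = l.map (pvOff (d + c)) := by
  induction l with
  | nil => rfl
  | cons t l ihl => simp [pvOff, ihl]; ring

theorem pvOff_zero (l : List (Int × Int)) : l.map (pvOff 0) = l := by
  induction l with
  | nil => rfl
  | cons t l ihl => simp [pvOff, ihl]

theorem pv_xor_bit (a b x y : Nat) (hx : x < 2) (hy : y < 2) :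
    (2 * a + x) ^^^ (2 * b + y) = 2 * (a ^^^ b) + (x ^^^ y) := by
  have hxy : x ^^^ y < 2 := by
    interval_cases x <;> interval_cases y <;> decide
  apply Nat.eq_of_testBit_eq; intro i
  cases i with
  | zero =>
    rw [Nat.testBit_xor, Nat.testBit_zero, Nat.testBit_zero, Nat.testBit_zero]
    have m1 : (2 * a + x) % 2 = x := by omega
    have m2 : (2 * b + y) % 2 = y := by omega
    have m3 : (2 * (a ^^^ b) + (x ^^^ y)) % 2 = x ^^^ y := by omega
    rw [m1, m2, m3]
    interval_cases x <;> interval_cases y <;> decide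
  | succ i =>
    rw [Nat.testBit_xor, Nat.testBit_succ, Nat.testBit_succ, Nat.testBit_succ]
    have d1 : (2 * a + x) / 2 = a := by omega
    have d2 : (2 * b + y) / 2 = b := by omega
    have d3 : (2 * (a ^^^ b) + (x ^^^ y)) / 2 = a ^^^ b := by omega
    rw [d1, d2, d3, Nat.testBit_xor]

theorem pv_xor_ee (a b : Nat) : (2 * a) ^^^ (2 * b) = 2 * (a ^^^ b) := by
  have h := pv_xor_bit a b 0 0 (by omega) (by omega)
  simpa using h

theorem pv_xor_oo (a b : Nat) : (2 * a + 1) ^^^ (2 * b + 1) = 2 * (a ^^^ b) := by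
  have h := pv_xor_bit a b 1 1 (by omega) (by omega)
  simpa using h

theorem pv_xor_eo (a b : Nat) : (2 * a) ^^^ (2 * b + 1) = 2 * (a ^^^ b) + 1 := by
  have h := pv_xor_bit a b 0 1 (by omega) (by omega)
  simpa using h

theorem pv_xor_oe (a b : Nat) : (2 * a + 1) ^^^ (2 * b) = 2 * (a ^^^ b) + 1 := by
  have h := pv_xor_bit a b 1 0 (by omega) (by omega)
  simpa using h

theorem pvZ_two_mul (a : Nat) : pvZ (2 * a) = 2 * pvZ a := by
  unfold pvZ
  have : 3 * (2 * a) = 2 * (3 * a) := by ring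
  rw [this, pv_xor_ee]

theorem pvZ_eq_zero (n : Nat) : pvZ n = 0 ↔ n = 0 := by
  unfold pvZ
  rw [Nat.xor_eq_zero_iff]
  omega

theorem pvZ_mod_two (n : Nat) : pvZ n % 2 = 0 := by
  rcases Nat.even_or_odd n with ⟨a, ha⟩ | ⟨a, ha⟩
  · subst ha
    have : a + a = 2 * a := by ring
    rw [this, pvZ_two_mul]; omega
  · subst ha
    have h3 : 3 * (2 * a + 1) = 2 * (3 * a + 1) + 1 := by ring
    unfold pvZ
    rw [h3, pv_xor_oo]; omega

-- (3a+2) XOR a = Z (a+1)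
theorem pvZ_id (a : Nat) : (3 * a + 2) ^^^ a = pvZ (a + 1) := by
  induction a using Nat.strong_induction_on with
  | _ a ih =>
    rcases Nat.even_or_odd a with ⟨k, hk⟩ | ⟨k, hk⟩
    · have hk' : a = 2 * k := by omega
      subst hk'
      have h1 : 3 * (2 * k) + 2 = 2 * (3 * k + 1) := by ring
      rw [h1, pv_xor_ee]
      have h2 : pvZ (2 * k + 1) = (2 * (3 * k + 1) + 1) ^^^ (2 * k + 1) := by
        unfold pvZ; congr 1; ring
      rw [h2, pv_xor_oo]
    · have hk' : a = 2 * k + 1 := by omega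
      subst hk'
      have h1 : 3 * (2 * k + 1) + 2 = 2 * (3 * k + 2) + 1 := by ring
      rw [h1, pv_xor_oo]
      have h2 : 2 * k + 1 + 1 = 2 * (k + 1) := by ring
      rw [h2, pvZ_two_mul]
      rw [ih k (by omega)]

theorem pvZ_4a1 (a : Nat) : pvZ (4 * a + 1) = 4 * pvZ a + 2 := by
  have h0 : pvZ (4 * a + 1) = (2 * (2 * (3 * a) + 1) + 1) ^^^ (2 * (2 * a) + 1) := by
    unfold pvZ; congr 1 <;> ring
  rw [h0, pv_xor_oo, pv_xor_oe]
  unfold pvZ; ring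

theorem pvZ_4a3 (a : Nat) : pvZ (4 * a + 3) = 4 * pvZ (a + 1) + 2 := by
  have h0 : pvZ (4 * a + 3) = (2 * (2 * (3 * a + 2)) + 1) ^^^ (2 * (2 * a + 1) + 1) := by
    unfold pvZ; congr 1 <;> ring
  rw [h0, pv_xor_oo, pv_xor_eo, pvZ_id]
  ring

-- where Z(a+1) has a set bit, a and a+1 have the same bit
theorem pv_signAgree (a : Nat) : ∀ j, (pvZ (a + 1)).testBit j = true →
    (a + 1).testBit j = a.testBit j := by
  induction a using Nat.strong_induction_on with
  | _ a ih =>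
    intro j hj
    rcases Nat.even_or_odd a with ⟨b, hb⟩ | ⟨b, hb⟩
    · have hb' : a = 2 * b := by omega
      subst hb'
      cases j with
      | zero =>
        exfalso
        have h0 := pvZ_mod_two (2 * b + 1)
        rw [Nat.testBit_zero, decide_eq_true_eq] at hj
        omega
      | succ j =>
        have h1 : (2 * b + 1) / 2 = b := by omega
        have h2 : (2 * b) / 2 = b := by omega
        simp [Nat.testBit_succ, h1, h2]
    · have hb' : a = 2 * b + 1 := by omega
      subst hb'
      have hZ : pvZ (2 * b + 1 + 1) = 2 * pvZ (b + 1) := by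
        have : 2 * b + 1 + 1 = 2 * (b + 1) := by ring
        rw [this, pvZ_two_mul]
      cases j with
      | zero =>
        exfalso
        rw [hZ, Nat.testBit_zero, decide_eq_true_eq] at hj
        omega
      | succ j =>
        rw [hZ] at hj
        have h3 : 2 * pvZ (b + 1) / 2 = pvZ (b + 1) := by omega
        rw [Nat.testBit_succ, h3] at hj
        have := ih b (by omega) j hj
        have h4 : (2 * b + 1 + 1) / 2 = b + 1 := by omega
        have h5 : (2 * b + 1) / 2 = b := by omega
        simp [Nat.testBit_succ, h4, h5, this]

theorem pv_mod_shift (n q : Nat) : ((n >>> q) % 2 = 1) ↔ n.testBit q = true := by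
  induction q generalizing n with
  | zero => simp [Nat.testBit_zero]
  | succ q ih =>
    rw [Nat.testBit_succ]
    have h : n >>> (q + 1) = (n / 2) >>> q := by
      simp [Nat.shiftRight_eq_div_pow, Nat.div_div_eq_div_mul, pow_succ]; ring_nf
    rw [h, ih]

theorem pvGoB_congr (m : Nat) : ∀ (s : Int) (n1 n2 q1 q2 : Nat),
    (∀ j, m.testBit j = true → n1.testBit (q1 + j) = n2.testBit (q2 + j)) →
    pvGoB s n1 m q1 = (pvGoB s n2 m q2).map (pvOff ((q1 : Int) - q2)) := by
  induction m using Nat.strong_induction_on with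
  | _ m ih =>
    intro s n1 n2 q1 q2 hbits
    by_cases h0 : m = 0
    · subst h0; simp [pvGoB]
    · rw [pvGoB, dif_neg h0]
      conv_rhs => rw [pvGoB]
      rw [dif_neg h0, List.map_append]
      have hrec := ih (m / 2) (by omega) s n1 n2 (q1 + 1) (q2 + 1)
        (by
          intro j hj
          have hb : m.testBit (j + 1) = true := by
            rw [Nat.testBit_succ]; exact hj
          have := hbits (j + 1) hb
          have e1 : q1 + 1 + j = q1 + (j + 1) := by omega
          have e2 : q2 + 1 + j = q2 + (j + 1) := by omega
          rw [e1, e2]; exact this)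
      have hoff : (((q1 + 1) : Nat) : Int) - (((q2 + 1) : Nat) : Int) = (q1 : Int) - q2 := by
        push_cast; ring
      rw [hoff] at hrec
      rw [hrec]
      congr 1
      by_cases hm : m % 2 = 1
      · rw [if_pos hm, if_pos hm]
        have hb0 : m.testBit 0 = true := by rw [Nat.testBit_zero, decide_eq_true_eq]; exact hm
        have hsign := hbits 0 hb0
        simp only [Nat.add_zero] at hsign
        have hiff : ((n1 >>> q1) % 2 = 1) ↔ ((n2 >>> q2) % 2 = 1) := by
          rw [pv_mod_shift, pv_mod_shift, hsign]
        rw [List.map_cons, List.map_nil]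
        by_cases hs : (n1 >>> q1) % 2 = 1
        · rw [if_pos hs, if_pos (hiff.mp hs)]
          simp only [pvOff]; norm_num
        · rw [if_neg hs, if_neg (fun h => hs (hiff.mpr h))]
          simp only [pvOff]; norm_num
      · rw [if_neg hm, if_neg hm, List.map_nil]

theorem pv_main (m : Nat) : ∀ (s pos : Int),
    pvGoA s m pos = (pvGoB s m (pvZ m >>> 1) 1).map (pvOff pos) := by
  induction m using Nat.strong_induction_on with
  | _ m ih =>
    intro s pos
    by_cases h0 : m = 0
    · subst h0; simp [pvGoA, pvGoB, pvZ]
    by_cases h1 : m % 2 = 1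
    · by_cases h2 : m / 2 % 2 = 1
      · -- m = 4a + 3
        obtain ⟨a, ha⟩ : ∃ a, m = 4 * a + 3 := ⟨m / 4, by omega⟩
        subst ha
        have hZs : pvZ (4 * a + 3) >>> 1 = 2 * pvZ (a + 1) + 1 := by
          rw [pvZ_4a3, Nat.shiftRight_eq_div_pow]; omega
        rw [pvGoA, dif_neg h0, dif_pos h1, dif_pos h2]
        have hne : (4 * a + 3 + 1) / 2 = 2 * (a + 1) := by omega
        rw [hne, ih (2 * (a + 1)) (by omega) s (pos + 1)]
        have hZ2 : pvZ (2 * (a + 1)) >>> 1 = pvZ (a + 1) := by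
          rw [pvZ_two_mul, Nat.shiftRight_eq_div_pow]; omega
        rw [hZ2, hZs]
        conv_rhs => rw [pvGoB]
        rw [dif_neg (by omega : ¬ (2 * pvZ (a + 1) + 1 = 0))]
        rw [if_pos (by omega : (2 * pvZ (a + 1) + 1) % 2 = 1)]
        rw [if_pos (by rw [Nat.shiftRight_eq_div_pow]; omega :
              ((4 * a + 3) >>> 1) % 2 = 1)]
        rw [(by omega : (2 * pvZ (a + 1) + 1) / 2 = pvZ (a + 1))]
        have hcongr := pvGoB_congr (pvZ (a + 1)) s (4 * a + 3) (2 * (a + 1)) 2 1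
          (by
            intro j hj
            have hsa := pv_signAgree a j hj
            have e1 : (4 * a + 3).testBit (2 + j) = a.testBit j := by
              have d1 : (4 * a + 3) / 2 = 2 * a + 1 := by omega
              have d2 : (2 * a + 1) / 2 = a := by omega
              rw [(by omega : (2 : Nat) + j = (j + 1) + 1), Nat.testBit_succ,
                Nat.testBit_succ, d1, d2]
            have e2 : (2 * (a + 1)).testBit (1 + j) = (a + 1).testBit j := by
              have d1 : (2 * (a + 1)) / 2 = a + 1 := by omega
              rw [(by omega : (1 : Nat) + j = j + 1), Nat.testBit_succ, d1]
            rw [e1, e2, hsa])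
        norm_num at hcongr
        rw [hcongr, List.map_append, pvOff_off,
          (by ring : (1 : Int) + pos = pos + 1), List.map_cons, List.map_nil]
        simp only [pvOff]
        norm_num
      · -- m = 4a + 1
        obtain ⟨a, ha⟩ : ∃ a, m = 4 * a + 1 := ⟨m / 4, by omega⟩
        subst ha
        have hZs : pvZ (4 * a + 1) >>> 1 = 2 * pvZ a + 1 := by
          rw [pvZ_4a1, Nat.shiftRight_eq_div_pow]; omega
        rw [pvGoA, dif_neg h0, dif_pos h1, dif_neg h2]
        have hne : (4 * a + 1) / 2 = 2 * a := by omega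
        rw [hne, ih (2 * a) (by omega) s (pos + 1)]
        have hZ2 : pvZ (2 * a) >>> 1 = pvZ a := by
          rw [pvZ_two_mul, Nat.shiftRight_eq_div_pow]; omega
        rw [hZ2, hZs]
        conv_rhs => rw [pvGoB]
        rw [dif_neg (by omega : ¬ (2 * pvZ a + 1 = 0))]
        rw [if_pos (by omega : (2 * pvZ a + 1) % 2 = 1)]
        rw [if_neg (by rw [Nat.shiftRight_eq_div_pow]; omega :
              ¬ (((4 * a + 1) >>> 1) % 2 = 1))]
        rw [(by omega : (2 * pvZ a + 1) / 2 = pvZ a)]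
        have hcongr := pvGoB_congr (pvZ a) s (4 * a + 1) (2 * a) 2 1
          (by
            intro j _
            have e1 : (4 * a + 1).testBit (2 + j) = a.testBit j := by
              have d1 : (4 * a + 1) / 2 = 2 * a := by omega
              have d2 : (2 * a) / 2 = a := by omega
              rw [(by omega : (2 : Nat) + j = (j + 1) + 1), Nat.testBit_succ,
                Nat.testBit_succ, d1, d2]
            have e2 : (2 * a).testBit (1 + j) = a.testBit j := by
              have d1 : (2 * a) / 2 = a := by omega
              rw [(by omega : (1 : Nat) + j = j + 1), Nat.testBit_succ, d1]
            rw [e1, e2])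
        norm_num at hcongr
        rw [hcongr, List.map_append, pvOff_off,
          (by ring : (1 : Int) + pos = pos + 1), List.map_cons, List.map_nil]
        simp only [pvOff]
        norm_num
    · -- m = 2a, a ≠ 0
      obtain ⟨a, ha⟩ : ∃ a, m = 2 * a := ⟨m / 2, by omega⟩
      subst ha
      have ha0 : a ≠ 0 := by omega
      rw [pvGoA, dif_neg h0, dif_neg h1]
      have hne : (2 * a) / 2 = a := by omega
      rw [hne, ih a (by omega) s (pos + 1)]
      have hZ2 : pvZ (2 * a) >>> 1 = pvZ a := by
        rw [pvZ_two_mul, Nat.shiftRight_eq_div_pow]; omega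
      rw [hZ2]
      conv_rhs => rw [pvGoB]
      rw [dif_neg (fun h => ha0 ((pvZ_eq_zero a).mp h))]
      rw [if_neg (by have := pvZ_mod_two a; omega : ¬ (pvZ a % 2 = 1))]
      rw [← Nat.shiftRight_one]
      have hcongr := pvGoB_congr (pvZ a >>> 1) s (2 * a) a 2 1
        (by
          intro j _
          have e1 : (2 * a).testBit (2 + j) = a.testBit (1 + j) := by
            have d1 : (2 * a) / 2 = a := by omega
            rw [(by omega : (2 : Nat) + j = (1 + j) + 1), Nat.testBit_succ, d1]
          rw [e1])
      norm_num at hcongr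
      rw [hcongr, List.nil_append, pvOff_off]
      have e3 : (1 : Int) + pos = pos + 1 := by omega
      rw [e3]

-- ===== VERDICT (by name: the statement is the Claim_ definition above) =====
theorem to_csd_py_spec : Claim_equal_to_csd_py := by
  intro value _
  unfold Spec_to_csd_py to_csd_py to_csd_py_alt
  by_cases h : value = 0
  · simp [h]
  · simp only [h, if_false]
    rw [pv_main]
    rw [pvOff_zero]
    rfl
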